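-- pv_equiv track=rewrite | github.com/pr4nshul/CFC-Python-DSA-March | Kartik_Behl/Assignment_3.py | get_maximum_perfect_string
-- ===== SOURCE A (Python) =====
-- def get_maximum_perfect_string(input_str,max_changes):
--     max_count_sbstr = 1
--     if not input_str:
--         return 0
--     size = len(input_str)
--     if  size > 1:
--         for i in range(0,size):
--             changes = max_changes
--             count_subs_str = 0
--             prev_char = input_str[i]
--             for j in range(i,-1,-1):
--                 if input_str[j] != prev_char:
--                      if changes != 0:
--                          changes -= 1
--                      else:
--                         break
--                 count_subs_str += 1
--             if count_subs_str > max_count_sbstr: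
--                 max_count_sbstr = count_subs_str
--     return max_count_sbstr
-- ===== SOURCE B (Python) =====
-- def get_maximum_perfect_string(input_str, max_changes):
--     # For each distinct character c, sweep once keeping the last (max_changes+1)
--     # positions of non-c characters; at every index holding c, the best backward
--     # window ending there starts right after the (max_changes+1)-th last mismatch.
--     best = 0
--     for c in set(input_str):
--         misses = []
--         for r, ch in enumerate(input_str):
--             if ch == c:
--                 start = 0 if len(misses) <= max_changes else misses[0] + 1
--                 if r + 1 - start > best:
--                     best = r + 1 - start
--             else:
--                 misses.append(r)
--                 if len(misses) > max_changes + 1: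
--                     misses.pop(0)
--     return best
-- ===== Notes on version B (the rewrite author's own statement) =====
-- stated objective: faster
-- what changed: A re-scans backward from every index (O(n^2)); B makes one forward sweep per distinct character keeping only the last max_changes+1 mismatch positions, so each backward window is read off in O(1) from the front of that buffer.
-- outside the precondition, e.g. on get_maximum_perfect_string('ab', -1): A returns 2, B raises IndexError
import Mathlib
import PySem

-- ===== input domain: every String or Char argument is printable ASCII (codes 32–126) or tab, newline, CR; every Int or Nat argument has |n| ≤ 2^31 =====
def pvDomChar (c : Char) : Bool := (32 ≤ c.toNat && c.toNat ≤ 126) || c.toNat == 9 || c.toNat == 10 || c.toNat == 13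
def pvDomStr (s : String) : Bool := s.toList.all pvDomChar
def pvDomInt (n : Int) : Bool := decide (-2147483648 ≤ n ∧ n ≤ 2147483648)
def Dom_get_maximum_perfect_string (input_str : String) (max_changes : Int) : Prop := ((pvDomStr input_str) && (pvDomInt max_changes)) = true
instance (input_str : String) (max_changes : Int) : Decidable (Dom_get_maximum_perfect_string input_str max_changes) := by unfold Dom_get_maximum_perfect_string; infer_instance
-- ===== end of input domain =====

-- B replaces A's backward re-scan from every index by one forward sweep per distinct
-- character that keeps only the last max_changes+1 mismatch positions (faster on
-- inputs with long windows; equal return value proved below on Pre_).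

-- ===== PORT A =====
-- inner loop 'for j in range(i,-1,-1): …' of A (break returns count_subs_str)
def pvA_inner (l : List Char) (prev : Char) : ℕ → Int → ℕ → ℕ
  | j, changes, count =>
    if l.getD j prev ≠ prev then
      if changes ≠ 0 then
        match j with
        | 0 => count + 1
        | j' + 1 => pvA_inner l prev j' (changes - 1) (count + 1)
      else count
    else
      match j with
      | 0 => count + 1
      | j' + 1 => pvA_inner l prev j' changes (count + 1)

def get_maximum_perfect_string (input_str : String) (max_changes : Int) : Int :=
  let l := input_str.toList
  if l = [] then 0
  else
    let size := l.length
    if size > 1 then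
      (((List.range size).foldl (fun acc i =>
        let prev_char := l.getD i ' '
        let count_subs_str := pvA_inner l prev_char i max_changes 0
        if count_subs_str > acc then count_subs_str else acc) 1 : ℕ) : Int)
    else 1

-- ===== PORT B =====
-- body of Source B's inner 'for r, ch in enumerate(input_str)' loop, for character c
def pvB_step (k : Int) (c : Char) (st : List Int × Int) (p : Int × Char) : List Int × Int :=
  if p.2 = c then
    let start : Int := if (st.1.length : Int) ≤ k then 0 else st.1.headD 0 + 1
    (st.1, if p.1 + 1 - start > st.2 then p.1 + 1 - start else st.2)
  else
    let m2 := st.1 ++ [p.1]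
    (if (m2.length : Int) > k + 1 then m2.tail else m2, st.2)

-- one sweep over the string for character c (state: misses buffer, best)
def pvB_scan (l : List Char) (k : Int) (c : Char) (best0 : Int) : List Int × Int :=
  (PySem.List.enumerate l 0).foldl (pvB_step k c) ([], best0)

def get_maximum_perfect_string_alt (input_str : String) (max_changes : Int) : Int :=
  (PySem.Set.ofList input_str.toList).foldl
    (fun best c => (pvB_scan input_str.toList max_changes c best).2) 0

-- ===== PRECONDITION & SPEC =====
-- Pre_ excludes negative change budgets on NON-empty strings: there A's 'changes != 0'
-- test never fires, so A returns len(input_str) (the negative budget acts as unlimited),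
-- while B raises IndexError; on the empty string both return 0 for any budget.
def Pre_get_maximum_perfect_string (input_str : String) (max_changes : Int) : Prop :=
  0 ≤ max_changes ∨ input_str = ""
instance (input_str : String) (max_changes : Int) : Decidable (Pre_get_maximum_perfect_string input_str max_changes) := by unfold Pre_get_maximum_perfect_string; infer_instance

def pvWitness_get_maximum_perfect_string : String × Int := ("aab", 1)

def Spec_get_maximum_perfect_string (input_str : String) (max_changes : Int) (out : Int) : Prop := out = get_maximum_perfect_string_alt input_str max_changes
instance (input_str : String) (max_changes : Int) (out : Int) : Decidable (Spec_get_maximum_perfect_string input_str max_changes out) := by unfold Spec_get_maximum_perfect_string; infer_instance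

-- ===== CLAIM (what is proved, stated in full; the proofs are below) =====
def Claim_equal_get_maximum_perfect_string : Prop := ∀ (input_str : String) (max_changes : Int), Dom_get_maximum_perfect_string input_str max_changes → Pre_get_maximum_perfect_string input_str max_changes → Spec_get_maximum_perfect_string input_str max_changes (get_maximum_perfect_string input_str max_changes)

-- ===== LEMMAS AND PROOFS =====

def pvG (c : Char) : ℕ → List Char → ℕ
  | _, [] => 0
  | K, x :: xs =>
    if x = c then pvG c K xs + 1
    else match K with
      | 0 => 0
      | K' + 1 => pvG c K' xs + 1

def pvM (c : Char) (ys : List Char) (m : ℕ) : ℕ := ((ys.take m).filter (fun x => x != c)).length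

theorem pvG_le_length (c : Char) (K : ℕ) (ys : List Char) : pvG c K ys ≤ ys.length := by
  induction ys generalizing K with
  | nil => simp [pvG]
  | cons x xs ih =>
    by_cases hx : x = c
    · simpa [pvG, hx] using ih K
    · cases K with
      | zero => simp [pvG, hx]
      | succ K' => simpa [pvG, hx] using ih K'

theorem pvM_zero (c : Char) (ys : List Char) : pvM c ys 0 = 0 := by simp [pvM]

theorem pvM_cons (c x : Char) (xs : List Char) (m : ℕ) :
    pvM c (x :: xs) (m + 1) = if x = c then pvM c xs m else pvM c xs m + 1 := by
  by_cases hx : x = c <;> simp [pvM, hx]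

theorem pvM_mono (c : Char) (ys : List Char) {a b : ℕ} (h : a ≤ b) : pvM c ys a ≤ pvM c ys b := by
  have h1 : ys.take a = (ys.take b).take a := by rw [List.take_take, Nat.min_eq_left h]
  rw [pvM, pvM, h1]
  exact ((List.take_sublist _ _).filter _).length_le

theorem pvG_cond (c : Char) (K : ℕ) (ys : List Char) :
    pvM c ys (pvG c K ys) ≤ K ∧ (pvG c K ys = ys.length ∨ K < pvM c ys (pvG c K ys + 1)) := by
  induction ys generalizing K with
  | nil => simp [pvG, pvM]
  | cons x xs ih =>
    by_cases hx : x = c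
    · rcases ih K with ⟨ih1, ih2⟩
      refine ⟨?_, ?_⟩
      · simpa [pvG, hx, pvM_cons] using ih1
      · rcases ih2 with h | h
        · left; simp [pvG, hx, h]
        · right; simpa [pvG, hx, pvM_cons] using h
    · cases K with
      | zero =>
        refine ⟨by simp [pvG, hx, pvM_zero], Or.inr ?_⟩
        simp [pvG, hx, pvM_cons, pvM_zero]
      | succ K' =>
        rcases ih K' with ⟨ih1, ih2⟩
        refine ⟨by simpa [pvG, hx, pvM_cons] using ih1, ?_⟩
        rcases ih2 with h | h
        · left; simp [pvG, hx, h]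
        · right
          have hgx : pvG c (K' + 1) (x :: xs) = pvG c K' xs + 1 := by simp [pvG, hx]
          rw [hgx, pvM_cons, if_neg hx]
          omega

theorem pvG_unique (c : Char) (K : ℕ) (ys : List Char) (w : ℕ)
    (hle : w ≤ ys.length) (h1 : pvM c ys w ≤ K) (h2 : w = ys.length ∨ K < pvM c ys (w + 1)) :
    w = pvG c K ys := by
  have hg := pvG_cond c K ys
  have hgl := pvG_le_length c K ys
  rcases Nat.lt_trichotomy w (pvG c K ys) with h | h | h
  · rcases h2 with he | hk
    · omega
    · have := pvM_mono c ys (show w + 1 ≤ pvG c K ys from h)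
      omega
  · exact h
  · rcases hg.2 with he | hk
    · omega
    · have := pvM_mono c ys (show pvG c K ys + 1 ≤ w from h)
      omega

theorem pvGetD (l : List Char) (n : ℕ) (d : Char) : l.getD n d = l[n]?.getD d := rfl

theorem pvTake_rev (l : List Char) (i : ℕ) (d : Char) (h : i < l.length) :
    (l.take (i + 1)).reverse = l.getD i d :: (l.take i).reverse := by
  have h1 : l.take (i + 1) = l.take i ++ [l.getD i d] := by
    rw [List.take_add_one, List.getElem?_eq_getElem h, List.getD_eq_getElem l d h]
    simp
  rw [h1, List.reverse_append]
  simp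

theorem pvA_inner_eq (l : List Char) (prev : Char) (j : ℕ) (changes : Int) (count : ℕ)
    (hj : j < l.length) (hc : 0 ≤ changes) :
    pvA_inner l prev j changes count = count + pvG prev changes.toNat ((l.take (j+1)).reverse) := by
  induction j generalizing changes count with
  | zero =>
    rw [pvTake_rev l 0 prev hj]
    by_cases hx : l.getD 0 prev = prev
    all_goals rw [pvGetD] at hx
    · simp [pvA_inner, pvG, hx]
    · by_cases hch : changes = 0
      · simp [pvA_inner, pvG, hx, hch]
      · have ht : changes.toNat = (changes - 1).toNat + 1 := by omega
        simp only [pvA_inner, pvG, ht]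
        simp [hx, hch, pvG]
  | succ j' ih =>
    have hj' : j' < l.length := by omega
    rw [pvTake_rev l (j' + 1) prev hj]
    by_cases hx : l.getD (j' + 1) prev = prev
    all_goals rw [pvGetD] at hx
    · have : pvA_inner l prev (j' + 1) changes count = pvA_inner l prev j' changes (count + 1) := by
        rw [pvA_inner]; simp [hx]
      rw [this, ih changes (count + 1) hj' hc]
      simp [pvG, hx]; omega
    · by_cases hch : changes = 0
      · have : pvA_inner l prev (j' + 1) changes count = count := by
          rw [pvA_inner]; simp [hx, hch]
        rw [this]
        have : changes.toNat = 0 := by omega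
        simp [pvG, hx, this]
      · have hstep : pvA_inner l prev (j' + 1) changes count
            = pvA_inner l prev j' (changes - 1) (count + 1) := by
          rw [pvA_inner]; simp [hx, hch]
        have ht : changes.toNat = (changes - 1).toNat + 1 := by omega
        rw [hstep, ih (changes - 1) (count + 1) hj' (by omega), ht]
        simp [pvG, hx]; omega

def pvP (l : List Char) (c : Char) (t : ℕ) : List ℕ := (List.range t).filter (fun p => l.getD p c != c)

theorem mem_pvP (l : List Char) (c : Char) (t p : ℕ) :
    p ∈ pvP l c t ↔ p < t ∧ l.getD p c ≠ c := by
  simp [pvP, List.mem_filter, List.mem_range]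

theorem pvP_pairwise (l : List Char) (c : Char) (t : ℕ) : (pvP l c t).Pairwise (· < ·) := by
  exact List.Pairwise.sublist (List.filter_sublist) (List.pairwise_lt_range)

theorem pvP_nodup (l : List Char) (c : Char) (t : ℕ) : (pvP l c t).Nodup :=
  (pvP_pairwise l c t).imp (fun h => Nat.ne_of_lt h)

theorem pvP_succ_eq (l : List Char) (c : Char) (r : ℕ) (h : l.getD r c = c) :
    pvP l c (r + 1) = pvP l c r := by
  rw [pvGetD] at h
  simp [pvP, List.range_succ, List.filter_append, h]

theorem pvP_succ_append (l : List Char) (c : Char) (r : ℕ) (h : l.getD r c ≠ c) :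
    pvP l c (r + 1) = pvP l c r ++ [r] := by
  rw [pvGetD] at h
  simp [pvP, List.range_succ, List.filter_append, h]

theorem filter_ge_succ_nodup (Q : List ℕ) (h : Q.Nodup) (s : ℕ) :
    (Q.filter (fun p => s ≤ p)).length
      = (Q.filter (fun p => s + 1 ≤ p)).length + (if s ∈ Q then 1 else 0) := by
  induction Q with
  | nil => simp
  | cons a tl ih =>
    have ha : a ∉ tl := (List.nodup_cons.mp h).1
    have ih' := ih (List.nodup_cons.mp h).2
    by_cases has : a = s
    · subst has
      simp only [List.filter_cons, List.mem_cons]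
      have h1 : a ∉ tl → (if a ∈ tl then (1:ℕ) else 0) = 0 := by intro h; simp [h]
      simp [ih', h1 ha]
    · by_cases hsa : s ≤ a
      · have hsa' : s + 1 ≤ a := by omega
        simp only [List.filter_cons, hsa, hsa', if_pos, decide_true, List.mem_cons]
        simp [List.length_cons, ih', Ne.symm has]
        omega
      · have hsa' : ¬ (s + 1 ≤ a) := by omega
        simp only [List.filter_cons, List.mem_cons]
        simp [hsa, hsa', ih', Ne.symm has]

def pvTailK (l : List Char) (c : Char) (K : ℕ) (r : ℕ) : List ℕ :=
  (pvP l c r).drop ((pvP l c r).length - (K + 1))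

def pvStart (l : List Char) (c : Char) (K : ℕ) (r : ℕ) : ℕ :=
  if (pvTailK l c K r).length ≤ K then 0 else (pvTailK l c K r).headD 0 + 1

def pvWin (l : List Char) (c : Char) (K : ℕ) (r : ℕ) : ℕ := r + 1 - pvStart l c K r

def pvF (l : List Char) (K : ℕ) (i : ℕ) : ℕ := pvG (l.getD i ' ') K ((l.take (i+1)).reverse)

theorem pvM_eq_filter (l : List Char) (c : Char) (t m : ℕ) (ht : t ≤ l.length) (hm : m ≤ t) :
    pvM c ((l.take t).reverse) m = ((pvP l c t).filter (fun p => t - m ≤ p)).length := by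
  induction m with
  | zero =>
    rw [pvM_zero]
    symm
    rw [List.length_eq_zero_iff, List.filter_eq_nil_iff]
    intro p hp
    have := (mem_pvP l c t p).mp hp
    simp; omega
  | succ m ih =>
    have hm' : m ≤ t := by omega
    have hyl : ((l.take t).reverse).length = t := by
      simp [List.length_take]; omega
    have hidx : t - 1 - m < l.length := by omega
    -- head element of position m in the reversed prefix
    have hget : ((l.take t).reverse)[m]'(by omega) = l[t - 1 - m]'hidx := by
      rw [List.getElem_reverse]
      rw [List.getElem_take]
      congr 1
      simp [List.length_take]; omega
    have htake : ((l.take t).reverse).take (m + 1)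
        = ((l.take t).reverse).take m ++ [l[t - 1 - m]'hidx] := by
      rw [List.take_add_one, List.getElem?_eq_getElem (by omega : m < ((l.take t).reverse).length)]
      simp [hget]
    have hlhs : pvM c ((l.take t).reverse) (m + 1)
        = pvM c ((l.take t).reverse) m + (if l[t - 1 - m]'hidx ≠ c then 1 else 0) := by
      rw [pvM, pvM, htake, List.filter_append]
      by_cases hc : l[t - 1 - m]'hidx = c <;> simp [hc]
    have hs : t - (m + 1) = t - 1 - m := by omega
    have hmem : (t - 1 - m) ∈ pvP l c t ↔ l.getD (t - 1 - m) c ≠ c := by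
      rw [mem_pvP]; constructor
      · exact fun h => h.2
      · exact fun h => ⟨by omega, h⟩
    have hgd : l.getD (t - 1 - m) c = l[t - 1 - m]'hidx := List.getD_eq_getElem l c hidx
    have hQ := filter_ge_succ_nodup (pvP l c t) (pvP_nodup l c t) (t - 1 - m)
    have hsucc : t - 1 - m + 1 = t - m := by omega
    rw [hs]
    rw [hlhs, ih hm', hQ, hsucc]
    by_cases hc : l[t - 1 - m]'hidx = c
    · have : (t - 1 - m) ∉ pvP l c t := by rw [hmem, hgd]; simp [hc]
      simp [this, hc]
    · have : (t - 1 - m) ∈ pvP l c t := by rw [hmem, hgd]; exact hc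
      simp [this, hc]

theorem filter_ge_get_sorted (P : List ℕ) (h : P.Pairwise (· < ·)) (j : ℕ) (hj : j < P.length) :
    P.filter (fun x => P[j] ≤ x) = P.drop j := by
  induction P generalizing j with
  | nil => simp at hj
  | cons a tl ih =>
    have ha : ∀ x ∈ tl, a < x := fun x hx => (List.pairwise_cons.mp h).1 x hx
    cases j with
    | zero =>
      simp only [List.getElem_cons_zero, List.drop_zero, List.filter_cons]
      simp
      exact fun x hx => le_of_lt (ha x hx)
    | succ j =>
      have hj' : j < tl.length := by simpa using hj
      have hgt : a < tl[j] := ha _ (tl.getElem_mem hj')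
      simp only [List.getElem_cons_succ, List.filter_cons, List.drop_succ_cons]
      have : ¬ (tl[j] ≤ a) := by omega
      simp [this]
      exact ih (List.pairwise_cons.mp h).2 j hj'

theorem filter_gt_get_sorted (P : List ℕ) (h : P.Pairwise (· < ·)) (j : ℕ) (hj : j < P.length) :
    P.filter (fun x => P[j] + 1 ≤ x) = P.drop (j + 1) := by
  induction P generalizing j with
  | nil => simp at hj
  | cons a tl ih =>
    have ha : ∀ x ∈ tl, a < x := fun x hx => (List.pairwise_cons.mp h).1 x hx
    cases j with
    | zero =>
      simp only [List.getElem_cons_zero, List.filter_cons, List.drop_succ_cons, List.drop_zero]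
      have : ¬ (a + 1 ≤ a) := by omega
      simp [this]
      exact ha
    | succ j =>
      have hj' : j < tl.length := by simpa using hj
      have hgt : a < tl[j] := ha _ (tl.getElem_mem hj')
      simp only [List.getElem_cons_succ, List.filter_cons, List.drop_succ_cons]
      have : ¬ (tl[j] + 1 ≤ a) := by omega
      simp [this]
      exact ih (List.pairwise_cons.mp h).2 j hj'

theorem pvTailK_getD (l : List Char) (c : Char) (K r : ℕ) (h : ¬ (pvP l c r).length ≤ K) :
    (pvTailK l c K r).headD 0 = (pvP l c r)[(pvP l c r).length - (K + 1)]'(by omega) := by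
  rw [pvTailK, List.headD_eq_head?_getD, List.head?_drop,
     List.getElem?_eq_getElem (by omega : (pvP l c r).length - (K + 1) < (pvP l c r).length)]
  rfl

theorem pvWin_eq_pvF (l : List Char) (c : Char) (K : ℕ) (r : ℕ)
    (hr : r < l.length) (hc : l.getD r ' ' = c) :
    pvWin l c K r = pvF l K r := by
  have hgd : l.getD r c = c := by
    rw [List.getD_eq_getElem l c hr]
    rw [List.getD_eq_getElem l ' ' hr] at hc
    exact hc
  have hP1 : pvP l c (r + 1) = pvP l c r := pvP_succ_eq l c r hgd
  have hyl : ((l.take (r+1)).reverse).length = r + 1 := by simp; omega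
  rw [pvF, hc]
  set P := pvP l c r with hPdef
  by_cases h1 : P.length ≤ K
  · have htail : pvTailK l c K r = P := by
      rw [pvTailK, ← hPdef, Nat.sub_eq_zero_of_le (by omega), List.drop_zero]
    have hstart : pvStart l c K r = 0 := by rw [pvStart, htail, if_pos h1]
    have hwin : pvWin l c K r = r + 1 := by rw [pvWin, hstart]; omega
    rw [hwin]
    apply pvG_unique
    · rw [hyl]
    · rw [pvM_eq_filter l c (r+1) (r+1) (by omega) (le_refl _), hP1]
      have : (P.filter (fun p => r + 1 - (r+1) ≤ p)) = P := by
        apply List.filter_eq_self.mpr; intro x hx; simp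
      rw [this]; exact h1
    · left; rw [hyl]
  · have hjlt : P.length - (K + 1) < P.length := by omega
    set j := P.length - (K + 1) with hjdef
    have htlen : (pvTailK l c K r).length = K + 1 := by
      rw [pvTailK, ← hPdef, List.length_drop]; omega
    have hstart : pvStart l c K r = P[j] + 1 := by
      rw [pvStart, if_neg (by omega : ¬ (pvTailK l c K r).length ≤ K)]
      rw [pvTailK_getD l c K r h1]
    have hjr : P[j] < r := ((mem_pvP l c r P[j]).mp (P.getElem_mem hjlt)).1
    have hwin : pvWin l c K r = r - P[j] := by rw [pvWin, hstart]; omega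
    rw [hwin]
    apply pvG_unique
    · rw [hyl]; omega
    · rw [pvM_eq_filter l c (r+1) (r - P[j]) (by omega) (by omega), hP1]
      have hsub : r + 1 - (r - P[j]) = P[j] + 1 := by omega
      simp only [hsub]
      rw [filter_gt_get_sorted P (pvP_pairwise l c r) j hjlt, List.length_drop]
      omega
    · right
      rw [pvM_eq_filter l c (r+1) (r - P[j] + 1) (by omega) (by omega), hP1]
      have hsub : r + 1 - (r - P[j] + 1) = P[j] := by omega
      simp only [hsub]
      rw [filter_ge_get_sorted P (pvP_pairwise l c r) j hjlt, List.length_drop]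
      omega

theorem foldS_init_le {α : Type} (sel : α → Prop) [DecidablePred sel] (g : α → ℕ)
    (b : ℕ) (xs : List α) :
    b ≤ xs.foldl (fun a x => if sel x then max a (g x) else a) b := by
  induction xs generalizing b with
  | nil => simp
  | cons x xs ih =>
    simp only [List.foldl_cons]
    calc b ≤ (if sel x then max b (g x) else b) := by split <;> omega
    _ ≤ _ := ih _

theorem foldS_mem_le {α : Type} (sel : α → Prop) [DecidablePred sel] (g : α → ℕ)
    (b : ℕ) (xs : List α) (x : α) (hx : x ∈ xs) (hs : sel x) :
    g x ≤ xs.foldl (fun a x => if sel x then max a (g x) else a) b := by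
  induction xs generalizing b with
  | nil => simp at hx
  | cons y ys ih =>
    simp only [List.foldl_cons]
    rcases List.mem_cons.mp hx with h | h
    · subst h
      calc g x ≤ (if sel x then max b (g x) else b) := by simp [hs]
      _ ≤ _ := foldS_init_le sel g _ ys
    · exact ih _ h

theorem foldS_le {α : Type} (sel : α → Prop) [DecidablePred sel] (g : α → ℕ)
    (b m : ℕ) (xs : List α) (hb : b ≤ m) (hg : ∀ x ∈ xs, sel x → g x ≤ m) :
    xs.foldl (fun a x => if sel x then max a (g x) else a) b ≤ m := by
  induction xs generalizing b with
  | nil => simpa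
  | cons y ys ih =>
    simp only [List.foldl_cons]
    apply ih
    · split
      · exact max_le hb (hg y (by simp) (by assumption))
      · exact hb
    · exact fun x hx hs => hg x (by simp [hx]) hs

theorem foldS_max_init {α : Type} (sel : α → Prop) [DecidablePred sel] (g : α → ℕ)
    (a b : ℕ) (xs : List α) :
    xs.foldl (fun acc x => if sel x then max acc (g x) else acc) (max a b)
      = max a (xs.foldl (fun acc x => if sel x then max acc (g x) else acc) b) := by
  induction xs generalizing b with
  | nil => simp
  | cons y ys ih =>
    simp only [List.foldl_cons]
    by_cases hs : sel y
    · rw [if_pos hs, if_pos hs, max_assoc, ih]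
    · rw [if_neg hs, if_neg hs, ih]

theorem pvStart_le (l : List Char) (c : Char) (K r : ℕ) : pvStart l c K r ≤ r + 1 := by
  rw [pvStart]
  split
  · omega
  · rename_i h
    have h1 : ¬ (pvP l c r).length ≤ K := by
      have := List.length_drop (l := pvP l c r) (i := (pvP l c r).length - (K + 1))
      rw [pvTailK] at h; omega
    rw [pvTailK_getD l c K r h1]
    have hmem := (pvP l c r).getElem_mem (show (pvP l c r).length - (K+1) < (pvP l c r).length by omega)
    have := ((mem_pvP l c r _).mp hmem).1
    omega

theorem pvTailK_zero (l : List Char) (c : Char) (K : ℕ) : pvTailK l c K 0 = [] := by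
  simp [pvTailK, pvP]

theorem pvTailK_succ_ne (l : List Char) (c : Char) (K r : ℕ) (h : l.getD r c ≠ c) :
    pvTailK l c K (r + 1)
      = if K + 1 < (pvTailK l c K r).length + 1
        then (pvTailK l c K r ++ [r]).tail else pvTailK l c K r ++ [r] := by
  have hP : pvP l c (r + 1) = pvP l c r ++ [r] := pvP_succ_append l c r h
  set P := pvP l c r with hPdef
  set m := P.length with hm
  by_cases hle : m ≤ K
  · have h0 : m - (K + 1) = 0 := by omega
    have ht : pvTailK l c K r = P := by rw [pvTailK, ← hPdef, ← hm, h0, List.drop_zero]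
    rw [pvTailK, hP, ht]
    have : ¬ (K + 1 < P.length + 1) := by omega
    rw [if_neg this]
    have : (P ++ [r]).length - (K + 1) = 0 := by simp; omega
    rw [this, List.drop_zero]
  · set j := m - (K + 1) with hj
    have htl : (pvTailK l c K r).length = K + 1 := by
      rw [pvTailK, ← hPdef, List.length_drop]; omega
    rw [if_pos (by omega)]
    have hne : P.drop j ≠ [] := by
      intro hnil
      have := List.length_drop (l := P) (i := j)
      rw [hnil] at this
      simp at this; omega
    rw [pvTailK, hP, pvTailK, ← hPdef, ← hj]
    have hlen : (P ++ [r]).length - (K + 1) = j + 1 := by simp; omega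
    rw [hlen, List.drop_append_of_le_length (by omega : j + 1 ≤ P.length),
        List.tail_append_of_ne_nil hne, List.tail_drop]

def pvCastL (xs : List ℕ) : List Int := xs.map (fun p => (p : Int))

theorem pvCastL_length (xs : List ℕ) : (pvCastL xs).length = xs.length := by
  simp [pvCastL]

theorem pvCastL_headD (xs : List ℕ) : (pvCastL xs).headD 0 = ((xs.headD 0 : ℕ) : Int) := by
  cases xs <;> simp [pvCastL]

theorem pvCastL_append_one (xs : List ℕ) (r : ℕ) : pvCastL xs ++ [((r : ℕ) : Int)] = pvCastL (xs ++ [r]) := by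
  simp [pvCastL]

theorem pvCastL_tail (xs : List ℕ) : (pvCastL xs).tail = pvCastL xs.tail := by
  cases xs <;> rfl

theorem pvScan_loop (l : List Char) (c : Char) (k : Int) (hk : 0 ≤ k) :
    ∀ (suf pre : List Char) (b : Int), l = pre ++ suf →
    (PySem.List.enumerate suf (pre.length : Int)).foldl (pvB_step k c)
        (pvCastL (pvTailK l c k.toNat pre.length), b)
      = (pvCastL (pvTailK l c k.toNat l.length),
         (List.range' pre.length suf.length).foldl
           (fun a r => if l.getD r ' ' = c then
              (if ((pvWin l c k.toNat r : ℕ) : Int) > a then ((pvWin l c k.toNat r : ℕ) : Int) else a)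
            else a) b) := by
  intro suf
  induction suf with
  | nil =>
    intro pre b hpre
    have : pre.length = l.length := by rw [hpre]; simp
    simp [PySem.List.enumerate, this]
  | cons x rest ih =>
    intro pre b hpre
    set K := k.toNat with hK
    set r := pre.length with hr
    have hrl : r < l.length := by rw [hpre]; simp [hr]
    have hget? : l[r]? = some x := by
      rw [hpre, List.getElem?_append_right (by omega : pre.length ≤ r)]
      simp [hr]
    have hgd : ∀ d, l.getD r d = x := by
      intro d; rw [pvGetD, hget?]; rfl
    have hcons : PySem.List.enumerate (x :: rest) (r : Int)
        = ((r : Int), x) :: PySem.List.enumerate rest ((r : Int) + 1) := by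
      rw [PySem.List.enumerate_cons]
    rw [hcons]
    rw [List.foldl_cons]
    have hnext : ((r : Int) + 1) = (((pre ++ [x]).length : ℕ) : Int) := by simp [hr]
    have hlen' : (pre ++ [x]).length = r + 1 := by simp [hr]
    have hstep : pvB_step k c (pvCastL (pvTailK l c K r), b) ((r : Int), x)
        = (pvCastL (pvTailK l c K (r + 1)),
           if l.getD r ' ' = c then
             (if ((pvWin l c K r : ℕ) : Int) > b then ((pvWin l c K r : ℕ) : Int) else b)
           else b) := by
      by_cases hxc : x = c
      · have hgc : l.getD r c = c := by rw [hgd]; exact hxc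
        have hP1 : pvTailK l c K (r + 1) = pvTailK l c K r := by
          rw [pvTailK, pvTailK, pvP_succ_eq l c r hgc]
        rw [pvB_step]
        simp only [hxc, if_pos, hgd ' ']
        rw [hP1]
        congr 1
        have hwz : (r : Int) + 1 - (if ((pvCastL (pvTailK l c K r)).length : Int) ≤ k then 0 else (pvCastL (pvTailK l c K r)).headD 0 + 1)
            = ((pvWin l c K r : ℕ) : Int) := by
          rw [pvCastL_length, pvCastL_headD]
          have hsle := pvStart_le l c K r
          by_cases hlen : (pvTailK l c K r).length ≤ K
          · rw [if_pos (by omega : (((pvTailK l c K r).length : ℕ) : Int) ≤ k)]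
            rw [pvWin, pvStart, if_pos hlen]
            push_cast; omega
          · rw [if_neg (by omega : ¬ (((pvTailK l c K r).length : ℕ) : Int) ≤ k)]
            rw [pvWin, pvStart, if_neg hlen]
            rw [pvStart, if_neg hlen] at hsle
            push_cast; omega
        rw [hwz]
      · have hgc : l.getD r c ≠ c := by rw [hgd]; exact hxc
        rw [pvB_step]
        simp only [hxc, hgd ' ', if_false]
        congr 1
        rw [pvTailK_succ_ne l c K r hgc]
        rw [pvCastL_append_one, pvCastL_length]
        by_cases hlt : K + 1 < (pvTailK l c K r).length + 1
        · rw [if_pos (by simp; omega : ((((pvTailK l c K r) ++ [r]).length : ℕ) : Int) > k + 1)]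
          rw [if_pos hlt]
          rw [pvCastL_tail]
        · rw [if_neg (by simp; omega : ¬ ((((pvTailK l c K r) ++ [r]).length : ℕ) : Int) > k + 1)]
          rw [if_neg hlt]
    rw [hstep, hnext, ← hlen']
    have hpre' : l = (pre ++ [x]) ++ rest := by rw [hpre]; simp
    rw [ih (pre ++ [x]) _ hpre']
    congr 1
    rw [hlen']
    have hrange : List.range' r (rest.length + 1) = r :: List.range' (r + 1) rest.length := by
      rw [List.range'_succ]
    rw [List.length_cons, hrange, List.foldl_cons]

theorem pvFoldI_cast (l : List Char) (c : Char) (K : ℕ) (xs : List ℕ) (bn : ℕ) :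
    xs.foldl (fun a r => if l.getD r ' ' = c then
        (if ((pvWin l c K r : ℕ) : Int) > a then ((pvWin l c K r : ℕ) : Int) else a) else a) ((bn : ℕ) : Int)
      = ((xs.foldl (fun a r => if l.getD r ' ' = c then max a (pvWin l c K r) else a) bn : ℕ) : Int) := by
  induction xs generalizing bn with
  | nil => rfl
  | cons r rs ih =>
    simp only [List.foldl_cons]
    by_cases hs : l.getD r ' ' = c
    · rw [if_pos hs, if_pos hs]
      have : (if ((pvWin l c K r : ℕ) : Int) > ((bn : ℕ) : Int) then ((pvWin l c K r : ℕ) : Int) else ((bn : ℕ) : Int))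
          = ((max bn (pvWin l c K r) : ℕ) : Int) := by
        split <;> push_cast <;> omega
      rw [this, ih]
    · rw [if_neg hs, if_neg hs, ih]

def pvMW (l : List Char) (c : Char) (K : ℕ) : ℕ :=
  (List.range l.length).foldl (fun a r => if l.getD r ' ' = c then max a (pvWin l c K r) else a) 0

theorem pvB_scan_snd (l : List Char) (k : Int) (c : Char) (bn : ℕ) (hk : 0 ≤ k) :
    (pvB_scan l k c ((bn : ℕ) : Int)).2
      = (((List.range l.length).foldl
          (fun a r => if l.getD r ' ' = c then max a (pvWin l c k.toNat r) else a) bn : ℕ) : Int) := by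
  have h0 : pvCastL (pvTailK l c k.toNat ([] : List Char).length) = [] := by
    simp [pvTailK_zero, pvCastL]
  have hloop := pvScan_loop l c k hk l [] ((bn : ℕ) : Int) (by simp)
  rw [h0] at hloop
  have hofs : ((([] : List Char).length : ℕ) : Int) = 0 := by simp
  rw [hofs] at hloop
  rw [pvB_scan, hloop]
  simp only [List.length_nil]
  rw [← List.range_eq_range']
  exact pvFoldI_cast l c k.toNat (List.range l.length) bn

theorem foldM_init_le {α : Type} (g : α → ℕ) (b : ℕ) (xs : List α) :
    b ≤ xs.foldl (fun a x => max a (g x)) b := by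
  induction xs generalizing b with
  | nil => simp
  | cons x xs ih => exact le_trans (le_max_left _ _) (ih _)

theorem foldM_mem_le {α : Type} (g : α → ℕ) (b : ℕ) (xs : List α) (x : α) (hx : x ∈ xs) :
    g x ≤ xs.foldl (fun a x => max a (g x)) b := by
  induction xs generalizing b with
  | nil => simp at hx
  | cons y ys ih =>
    simp only [List.foldl_cons]
    rcases List.mem_cons.mp hx with h | h
    · subst h; exact le_trans (le_max_right _ _) (foldM_init_le g _ ys)
    · exact ih _ h

theorem foldM_le {α : Type} (g : α → ℕ) (b m : ℕ) (xs : List α) (hb : b ≤ m)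
    (hg : ∀ x ∈ xs, g x ≤ m) :
    xs.foldl (fun a x => max a (g x)) b ≤ m := by
  induction xs generalizing b with
  | nil => simpa
  | cons y ys ih =>
    simp only [List.foldl_cons]
    apply ih
    · exact max_le hb (hg y (by simp))
    · exact fun x hx => hg x (by simp [hx])

theorem pvB_total (l : List Char) (k : Int) (hk : 0 ≤ k) :
    (PySem.Set.ofList l).foldl (fun best c => (pvB_scan l k c best).2) 0
      = (((PySem.Set.ofList l).foldl (fun a c => max a (pvMW l c k.toNat)) 0 : ℕ) : Int) := by
  suffices h : ∀ (cs : List Char) (bn : ℕ),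
      cs.foldl (fun best c => (pvB_scan l k c best).2) ((bn : ℕ) : Int)
        = ((cs.foldl (fun a c => max a (pvMW l c k.toNat)) bn : ℕ) : Int) by
    have := h (PySem.Set.ofList l) 0
    simpa using this
  intro cs
  induction cs with
  | nil => intro bn; rfl
  | cons c cs ih =>
    intro bn
    simp only [List.foldl_cons]
    rw [pvB_scan_snd l k c bn hk]
    have hS : (List.range l.length).foldl
        (fun a r => if l.getD r ' ' = c then max a (pvWin l c k.toNat r) else a) bn
        = max bn (pvMW l c k.toNat) := by
      have h := foldS_max_init (fun r => l.getD r ' ' = c) (pvWin l c k.toNat) bn 0 (List.range l.length)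
      simpa [pvMW] using h
    rw [hS, ih (max bn (pvMW l c k.toNat))]

theorem pvF_zero (l : List Char) (K : ℕ) (hl : l ≠ []) : pvF l K 0 = 1 := by
  cases l with
  | nil => exact absurd rfl hl
  | cons a as => simp [pvF, pvG]

theorem pvGroup (l : List Char) (K : ℕ) (hl : l ≠ []) :
    (PySem.Set.ofList l).foldl (fun a c => max a (pvMW l c K)) 0
      = (List.range l.length).foldl (fun a i => max a (pvF l K i)) 1 := by
  have hn : 0 < l.length := List.length_pos_of_ne_nil hl
  have hmemD : ∀ i, i < l.length → l.getD i ' ' ∈ l := by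
    intro i hi
    rw [List.getD_eq_getElem l ' ' hi]
    exact l.getElem_mem hi
  have hchars : ∀ i, i < l.length → l.getD i ' ' ∈ PySem.Set.ofList l := by
    intro i hi
    exact (PySem.Set.mem_ofList _ _).mpr (hmemD i hi)
  apply Nat.le_antisymm
  · apply foldM_le _ _ _ _ (Nat.zero_le _)
    intro c hc
    rw [pvMW]
    apply foldS_le _ _ _ _ _ (Nat.zero_le _)
    intro r hr hsel
    have hrn : r < l.length := List.mem_range.mp hr
    rw [pvWin_eq_pvF l c K r hrn hsel]
    exact foldM_mem_le _ _ _ _ hr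
  · apply foldM_le _ _ _ _ ?_ ?_
    · -- 1 ≤ LHS
      have h0 : pvWin l (l.getD 0 ' ') K 0 = 1 := by
        rw [pvWin_eq_pvF l (l.getD 0 ' ') K 0 hn rfl, pvF_zero l K hl]
      calc (1 : ℕ) = pvWin l (l.getD 0 ' ') K 0 := h0.symm
      _ ≤ pvMW l (l.getD 0 ' ') K := by
          rw [pvMW]
          exact foldS_mem_le _ _ _ _ 0 (List.mem_range.mpr hn) rfl
      _ ≤ _ := foldM_mem_le (fun c => pvMW l c K) 0 (PySem.Set.ofList l) (l.getD 0 ' ') (hchars 0 hn)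
    · intro i hi
      have hin : i < l.length := List.mem_range.mp hi
      calc pvF l K i = pvWin l (l.getD i ' ') K i := (pvWin_eq_pvF l (l.getD i ' ') K i hin rfl).symm
      _ ≤ pvMW l (l.getD i ' ') K := by
          rw [pvMW]
          exact foldS_mem_le _ _ _ _ i hi rfl
      _ ≤ _ := foldM_mem_le (fun c => pvMW l c K) 0 (PySem.Set.ofList l) (l.getD i ' ') (hchars i hin)

theorem pvAfold_eq (l : List Char) (k : Int) (hk : 0 ≤ k) (b : ℕ) :
    (List.range l.length).foldl (fun acc i =>
        let prev_char := l.getD i ' '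
        let count_subs_str := pvA_inner l prev_char i k 0
        if count_subs_str > acc then count_subs_str else acc) b
      = (List.range l.length).foldl (fun a i => max a (pvF l k.toNat i)) b := by
  suffices h : ∀ (xs : List ℕ), (∀ i ∈ xs, i < l.length) → ∀ b,
      xs.foldl (fun acc i =>
        let prev_char := l.getD i ' '
        let count_subs_str := pvA_inner l prev_char i k 0
        if count_subs_str > acc then count_subs_str else acc) b
      = xs.foldl (fun a i => max a (pvF l k.toNat i)) b by
    exact h (List.range l.length) (fun i hi => List.mem_range.mp hi) b
  intro xs hxs
  induction xs with
  | nil => intro b; rfl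
  | cons i is ih =>
    intro b
    simp only [List.foldl_cons]
    have hin : i < l.length := hxs i (by simp)
    have hA : pvA_inner l (l.getD i ' ') i k 0 = pvF l k.toNat i := by
      rw [pvA_inner_eq l (l.getD i ' ') i k 0 hin hk, pvF]
      omega
    have hmax : (if pvA_inner l (l.getD i ' ') i k 0 > b then pvA_inner l (l.getD i ' ') i k 0 else b)
        = max b (pvF l k.toNat i) := by
      rw [hA]; split <;> omega
    simp only [hmax]
    exact ih (fun j hj => hxs j (by simp [hj])) _

-- ===== VERDICT (by name: the statement is the Claim_ definition above) =====
theorem get_maximum_perfect_string_spec : Claim_equal_get_maximum_perfect_string := by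
  intro s k hdom hpre
  unfold Spec_get_maximum_perfect_string
  unfold get_maximum_perfect_string get_maximum_perfect_string_alt
  by_cases hl : s.toList = []
  · rw [if_pos hl, hl]
    rfl
  · have hk : 0 ≤ k := by
      rcases hpre with h | h
      · exact h
      · exact absurd (by simp [h]) hl
    rw [if_neg hl]
    have hB : (PySem.Set.ofList s.toList).foldl (fun best c => (pvB_scan s.toList k c best).2) 0
        = (((List.range s.toList.length).foldl (fun a i => max a (pvF s.toList k.toNat i)) 1 : ℕ) : Int) := by
      rw [pvB_total s.toList k hk, pvGroup s.toList k.toNat hl]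
    rw [hB]
    by_cases h2 : s.toList.length > 1
    · rw [if_pos h2, pvAfold_eq s.toList k hk 1]
    · rw [if_neg h2]
      have h1 : s.toList.length = 1 := by
        have := List.length_pos_of_ne_nil hl; omega
      rw [h1]
      have hfold : (List.range 1).foldl (fun a i => max a (pvF s.toList k.toNat i)) 1 = 1 := by
        simp [List.range_succ, pvF_zero s.toList k.toNat hl]
      rw [hfold]
      rfl
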